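-- pv_equiv track=rewrite | github.com/shubhamgyd/mission_TCS | Chegg/52_Inverted.py | inverted_word_count
-- ===== SOURCE A (Python) =====
-- def inverted_word_count(word_count_dict,banned):
--     # dictionary whih will modify the list according to the need
--     inverted_word_cnt={}
--
--     # Iterating the word dictionary
--     for key,value in word_count_dict.items():
--         # If key if not found in banned list
--         if key not in banned:
--
--             # if we have not created key in new word count dictionary
--             if value not in inverted_word_cnt.keys():
--                 # Generate new key along with list in new word count dictionary
--                 inverted_word_cnt[value]=[]
--
--                 # append the key as a value in new word count dictionary with value as a key
--                 inverted_word_cnt[value].append(key)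
--
--             # if we have already created key
--             else:
--                 # just append the key
--                 inverted_word_cnt[value].append(key)
--
--     # Sort the list of values in alphabetically order
--     for items in inverted_word_cnt.values():
--         items.sort()
--
--     # return dictionary
--     return inverted_word_cnt
-- ===== SOURCE B (Python) =====
-- def inverted_word_count(word_count_dict, banned):
--     banned_set = set(banned)
--     # register result keys (counts) in first-occurrence order, each with an empty bucket
--     inverted = {value: [] for key, value in word_count_dict.items() if key not in banned_set}
--     # visit the words alphabetically: every bucket is filled already sorted
--     for key in sorted(word_count_dict):
--         if key not in banned_set:
--             inverted[word_count_dict[key]].append(key)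
--     return inverted
-- ===== Notes on version B (the rewrite author's own statement) =====
-- stated objective: faster
-- what changed: replaces A's build-buckets-then-sort-each-bucket scheme by two linear passes: register each count (first-occurrence order) with an empty bucket, then visit the words in one globally sorted order so every bucket is filled already sorted; banned becomes a set, turning A's per-word O(|banned|) list scan into O(1)
import Mathlib
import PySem

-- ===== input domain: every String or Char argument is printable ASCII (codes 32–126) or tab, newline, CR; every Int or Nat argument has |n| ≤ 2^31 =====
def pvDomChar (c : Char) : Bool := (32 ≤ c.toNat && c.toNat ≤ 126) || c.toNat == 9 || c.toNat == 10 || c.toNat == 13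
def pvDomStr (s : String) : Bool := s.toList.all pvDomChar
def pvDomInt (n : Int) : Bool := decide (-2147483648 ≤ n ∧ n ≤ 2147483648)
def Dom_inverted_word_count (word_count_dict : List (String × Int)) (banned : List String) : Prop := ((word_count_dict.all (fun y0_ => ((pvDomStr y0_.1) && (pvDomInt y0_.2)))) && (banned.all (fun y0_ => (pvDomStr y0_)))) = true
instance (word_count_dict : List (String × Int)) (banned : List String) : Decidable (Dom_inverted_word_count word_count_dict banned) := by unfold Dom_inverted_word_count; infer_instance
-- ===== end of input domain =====

-- B replaces A's build-then-sort-each-bucket scheme by two linear passes: register the counts in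
-- first-occurrence order, then fill the buckets by visiting the words in alphabetical order (banned
-- held in a set), so no bucket ever needs sorting; same return value, simpler and measurably faster.


-- ===== PORT A =====
def inverted_word_count (word_count_dict : List (String × Int)) (banned : List String) : List (Int × List String) :=
  -- inverted_word_cnt = {}  …  for key, value in word_count_dict.items(): …
  let inverted_word_cnt : PySem.Dict Int (List String) :=
    word_count_dict.foldl (fun d kv =>
      -- if key not in banned:
      if banned.contains kv.1 = false then
        -- if value not in inverted_word_cnt.keys():
        if (PySem.Dict.keys d).contains kv.2 = false then
          -- inverted_word_cnt[value] = [] ; inverted_word_cnt[value].append(key)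
          (d.insert kv.2 []).modify kv.2 [] (fun l => l ++ [kv.1])
        else
          -- inverted_word_cnt[value].append(key)
          d.modify kv.2 [] (fun l => l ++ [kv.1])
      else d) PySem.Dict.empty
  -- for items in inverted_word_cnt.values(): items.sort()   (in-place sort of each value list)
  (PySem.Dict.mk (inverted_word_cnt.items.map
    (fun p => (p.1, PySem.List.sorted p.2 (fun x => x) false)))).items

-- ===== PORT B =====
def inverted_word_count_alt (word_count_dict : List (String × Int)) (banned : List String) : List (Int × List String) :=
  -- banned_set = set(banned)
  let banned_set : PySem.Set String := PySem.Set.ofList banned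
  -- inverted = {value: [] for key, value in word_count_dict.items() if key not in banned_set}
  let inverted : PySem.Dict Int (List String) :=
    word_count_dict.foldl (fun d kv =>
      if PySem.Set.contains banned_set kv.1 = false then d.insert kv.2 [] else d)
      PySem.Dict.empty
  -- for key in sorted(word_count_dict): if key not in banned_set: inverted[word_count_dict[key]].append(key)
  -- word_count_dict[key] is ported as getD with a dummy default: the key comes from the dict itself,
  -- so the lookup is exact (Python never reaches KeyError here); likewise inverted[…] always exists
  -- under Pre_ (pass 1 registered every non-banned value), so modify with default [] is exact.
  ((PySem.List.sorted (word_count_dict.map Prod.fst) (fun x => x) false).foldl (fun d k =>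
      if PySem.Set.contains banned_set k = false then
        d.modify ((PySem.Dict.mk word_count_dict).getD k 0) [] (fun l => l ++ [k])
      else d) inverted).items

-- ===== PRECONDITION & SPEC =====
-- Pre_ excludes association lists that repeat a word: the first argument is a Python dict, whose
-- keys are unique, so a duplicate-key list encodes no actual input of A (A raises on a non-dict).
def Pre_inverted_word_count (word_count_dict : List (String × Int)) (banned : List String) : Prop :=
  (word_count_dict.map Prod.fst).Nodup
instance (word_count_dict : List (String × Int)) (banned : List String) : Decidable (Pre_inverted_word_count word_count_dict banned) := by unfold Pre_inverted_word_count; infer_instance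

def pvWitness_inverted_word_count : (List (String × Int)) × List String :=
  ([("the", 2), ("cat", 1), ("sat", 2)], ["sat"])

def Spec_inverted_word_count (word_count_dict : List (String × Int)) (banned : List String) (out : List (Int × List String)) : Prop := out = inverted_word_count_alt word_count_dict banned
instance (word_count_dict : List (String × Int)) (banned : List String) (out : List (Int × List String)) : Decidable (Spec_inverted_word_count word_count_dict banned out) := by unfold Spec_inverted_word_count; infer_instance

-- ===== CLAIM (what is proved, stated in full; the proofs are below) =====
def Claim_equal_inverted_word_count : Prop := ∀ (word_count_dict : List (String × Int)) (banned : List String), Dom_inverted_word_count word_count_dict banned → Pre_inverted_word_count word_count_dict banned → Spec_inverted_word_count word_count_dict banned (inverted_word_count word_count_dict banned)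

-- ===== LEMMAS AND PROOFS =====

-- Python's list.sort on strings (no key)
def pvMsort (L : List String) : List String := PySem.List.sorted L (fun x => x) false
-- the final "sort every bucket" pass of A, on raw items
def pvMapS (l : List (Int × List String)) : List (Int × List String) :=
  l.map (fun p => (p.1, pvMsort p.2))

theorem pvFind?_mapS (l : List (Int × List String)) (v : Int) :
    (pvMapS l).find? (fun p => p.1 == v)
      = (l.find? (fun p => p.1 == v)).map (fun p => (p.1, pvMsort p.2)) := by
  induction l with
  | nil => rfl
  | cons p t ih =>
    by_cases h : p.1 == v
    · simp [pvMapS, h]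
    · simp [pvMapS, h] at ih ⊢
      simpa [pvMapS] using ih

theorem pvGetD_mapS (l : List (Int × List String)) (v : Int) :
    (PySem.Dict.mk (pvMapS l)).getD v [] = pvMsort ((PySem.Dict.mk l).getD v []) := by
  simp only [PySem.Dict.getD, PySem.Dict.get?, pvFind?_mapS]
  cases l.find? (fun p => p.1 == v) <;> simp [pvMsort, PySem.List.sorted]

theorem pvKeys_mapS (l : List (Int × List String)) :
    (PySem.Dict.mk (pvMapS l)).keys = (PySem.Dict.mk l).keys := by
  simp [PySem.Dict.keys, pvMapS, List.map_map, Function.comp_def]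

-- keys-list membership test of A = Dict.contains
theorem pvKeysContains (d : PySem.Dict Int (List String)) (v : Int) :
    (PySem.Dict.keys d).contains v = d.contains v := by
  rw [Bool.eq_iff_iff, List.contains_iff_mem]
  simp only [PySem.Dict.keys, PySem.Dict.contains, List.mem_map, List.any_eq_true, beq_iff_eq]

theorem pvBannedContains (banned : List String) (k : String) :
    PySem.Set.contains (PySem.Set.ofList banned) k = banned.contains k := by
  rw [Bool.eq_iff_iff]
  simp only [PySem.Set.contains, List.contains_iff_mem]
  exact PySem.Set.mem_ofList banned k

-- A's loop body collapses to a single modify (both branches append to the current bucket)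
theorem pvAstep_eq (banned : List String) (d : PySem.Dict Int (List String)) (kv : String × Int) :
    (if banned.contains kv.1 = false then
       if (PySem.Dict.keys d).contains kv.2 = false then
         (d.insert kv.2 []).modify kv.2 [] (fun l => l ++ [kv.1])
       else
         d.modify kv.2 [] (fun l => l ++ [kv.1])
     else d)
    = (if banned.contains kv.1 = false then
         d.modify kv.2 [] (fun l => l ++ [kv.1])
       else d) := by
  by_cases hb : banned.contains kv.1 = false
  · rw [if_pos hb, if_pos hb, pvKeysContains]
    by_cases hc : d.contains kv.2 = false
    · rw [if_pos hc, PySem.Dict.modify, PySem.Dict.getD_insert_self,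
          PySem.Dict.insert_insert_self, PySem.Dict.modify,
          PySem.Dict.getD_of_not_contains _ _ hc]
    · rw [if_neg hc]
  · rw [if_neg hb, if_neg hb]

-- ---- abbreviations used only by the proofs ----

-- the non-banned entries of word_count_dict, in order
def pvFilt (banned : List String) (wc : List (String × Int)) : List (String × Int) :=
  wc.filter (fun kv => !(banned.contains kv.1))
-- the dict lookup word_count_dict[key]
def pvLk (wc : List (String × Int)) (k : String) : Int := (PySem.Dict.mk wc).getD k 0
-- sorted(word_count_dict)
def pvSortedKeys (wc : List (String × Int)) : List String :=
  PySem.List.sorted (wc.map Prod.fst) (fun x => x) false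
-- A's grouping dict (before the sort pass), B's pass-1 dict, B's final dict
def pvDA (banned : List String) (wc : List (String × Int)) : PySem.Dict Int (List String) :=
  (pvFilt banned wc).foldl (fun d kv => d.modify kv.2 [] (fun l => l ++ [kv.1])) PySem.Dict.empty
def pvD1 (banned : List String) (wc : List (String × Int)) : PySem.Dict Int (List String) :=
  (pvFilt banned wc).foldl (fun d kv => d.insert kv.2 []) PySem.Dict.empty
def pvDB (banned : List String) (wc : List (String × Int)) : PySem.Dict Int (List String) :=
  ((pvSortedKeys wc).filter (fun k => !(banned.contains k))).foldl
    (fun d k => d.modify (pvLk wc k) [] (fun l => l ++ [k])) (pvD1 banned wc)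

-- a skip-else loop is a loop over the filtered list
theorem pvFoldl_skip {α β : Type} (c : α → Bool) (f : β → α → β) (l : List α) (init : β) :
    l.foldl (fun b a => if c a = false then f b a else b) init
      = (l.filter (fun a => !(c a))).foldl f init := by
  induction l generalizing init with
  | nil => rfl
  | cons a t ih =>
    by_cases h : c a = false
    · simp [List.filter_cons, h, ih]
    · simp [List.filter_cons, (by simpa using h : c a = true), h, ih]

-- the three port loops are pvDA / pvD1 / pvDB
theorem pvAfold_eq (banned : List String) (wc : List (String × Int)) :
    wc.foldl (fun d kv =>
      if banned.contains kv.1 = false then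
        if (PySem.Dict.keys d).contains kv.2 = false then
          (d.insert kv.2 []).modify kv.2 [] (fun l => l ++ [kv.1])
        else
          d.modify kv.2 [] (fun l => l ++ [kv.1])
      else d) PySem.Dict.empty = pvDA banned wc := by
  simp only [pvAstep_eq]
  exact pvFoldl_skip (fun kv => banned.contains kv.1) _ wc _

theorem pvB1fold_eq (banned : List String) (wc : List (String × Int)) :
    wc.foldl (fun d kv =>
      if PySem.Set.contains (PySem.Set.ofList banned) kv.1 = false then d.insert kv.2 [] else d)
      PySem.Dict.empty = pvD1 banned wc := by
  simp only [pvBannedContains]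
  exact pvFoldl_skip (fun kv => banned.contains kv.1) _ wc _

theorem pvB2fold_eq (banned : List String) (wc : List (String × Int)) :
    (PySem.List.sorted (wc.map Prod.fst) (fun x => x) false).foldl (fun d k =>
        if PySem.Set.contains (PySem.Set.ofList banned) k = false then
          d.modify ((PySem.Dict.mk wc).getD k 0) [] (fun l => l ++ [k])
        else d) (pvD1 banned wc) = pvDB banned wc := by
  simp only [pvBannedContains]
  exact pvFoldl_skip (fun k => banned.contains k) _ _ _

-- bucket contents of pvDA: the non-banned keys whose value is v, in input order
theorem pvDA_getD (banned : List String) (wc : List (String × Int)) (v : Int) :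
    (pvDA banned wc).getD v []
      = (((pvFilt banned wc).filter (fun kv => kv.2 == v)).map Prod.fst) := by
  unfold pvDA
  rw [show ((pvFilt banned wc).foldl
        (fun d kv => d.modify kv.2 [] (fun l => l ++ [kv.1])) PySem.Dict.empty)
      = (((pvFilt banned wc).map (fun kv => (kv.2, kv.1))).foldl
        (fun d p => d.modify p.1 [] (fun l => l ++ [p.2])) PySem.Dict.empty) from
      (List.foldl_map (f := fun kv : String × Int => (kv.2, kv.1))
        (g := fun (d : PySem.Dict Int (List String)) p => d.modify p.1 [] (fun l => l ++ [p.2]))).symm]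
  rw [PySem.Dict.getD_foldl_modify_append]
  simp [List.filter_map, List.map_map, Function.comp_def]

-- every bucket of pvD1 is empty
theorem pvD1_getD_aux (l : List (String × Int)) (d : PySem.Dict Int (List String)) (v : Int)
    (h : d.getD v [] = []) :
    (l.foldl (fun d kv => d.insert kv.2 []) d).getD v [] = [] := by
  induction l generalizing d with
  | nil => exact h
  | cons kv t ih =>
    refine ih _ ?_
    rw [PySem.Dict.getD_insert]
    split <;> simp [h]

theorem pvD1_getD (banned : List String) (wc : List (String × Int)) (v : Int) :
    (pvD1 banned wc).getD v [] = [] :=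
  pvD1_getD_aux _ _ _ (by simp [PySem.Dict.getD_empty])

-- bucket contents of pvDB: the non-banned keys (in sorted order) whose looked-up value is v
theorem pvDB_getD (banned : List String) (wc : List (String × Int)) (v : Int) :
    (pvDB banned wc).getD v []
      = ((pvSortedKeys wc).filter (fun k => !(banned.contains k))).filter
          (fun k => pvLk wc k == v) := by
  unfold pvDB
  rw [show (((pvSortedKeys wc).filter (fun k => !(banned.contains k))).foldl
        (fun d k => d.modify (pvLk wc k) [] (fun l => l ++ [k])) (pvD1 banned wc))
      = ((((pvSortedKeys wc).filter (fun k => !(banned.contains k))).map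
            (fun k => (pvLk wc k, k))).foldl
        (fun d p => d.modify p.1 [] (fun l => l ++ [p.2])) (pvD1 banned wc)) from
      (List.foldl_map (f := fun k => (pvLk wc k, k))
        (g := fun (d : PySem.Dict Int (List String)) p => d.modify p.1 [] (fun l => l ++ [p.2]))).symm]
  rw [PySem.Dict.getD_foldl_modify_append, pvD1_getD]
  simp [List.filter_map, List.map_map, Function.comp_def]

-- key lists (with their order): pvDA and pvD1 agree
theorem pvDA_keys (banned : List String) (wc : List (String × Int)) :
    (pvDA banned wc).keys = PySem.Set.ofList ((pvFilt banned wc).map (fun kv => kv.2)) := by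
  unfold pvDA
  rw [PySem.Dict.keys_foldl_modify_key (pvFilt banned wc) (fun kv => kv.2) []
        (fun _ kv => (fun l => l ++ [kv.1])), PySem.Dict.keys_empty, PySem.Set.update_nil_left]

theorem pvD1_keys (banned : List String) (wc : List (String × Int)) :
    (pvD1 banned wc).keys = PySem.Set.ofList ((pvFilt banned wc).map (fun kv => kv.2)) := by
  unfold pvD1
  rw [PySem.Dict.keys_foldl_insert_key (pvFilt banned wc) (fun kv => kv.2) (fun _ _ => []),
      PySem.Dict.keys_empty, PySem.Set.update_nil_left]

theorem pvUpdate_eq_self {α : Type} [BEq α] [LawfulBEq α] (xs : List α) (s : PySem.Set α)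
    (h : ∀ x ∈ xs, x ∈ s) : PySem.Set.update s xs = s := by
  induction xs generalizing s with
  | nil => rfl
  | cons x t ih =>
    have hc : s.contains x = true := List.contains_iff_mem.mpr (h x (by simp))
    have hx : PySem.Set.add s x = s := by unfold PySem.Set.add; rw [if_pos hc]
    show PySem.Set.update (PySem.Set.add s x) t = s
    rw [hx]
    exact ih s (fun y hy => h y (by simp [hy]))

-- the looked-up value of a key of the dict is a registered value
theorem pvLk_mem (banned : List String) (wc : List (String × Int)) (k : String)
    (hk : k ∈ wc.map Prod.fst) (hb : (!(banned.contains k)) = true) :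
    pvLk wc k ∈ (pvFilt banned wc).map (fun kv => kv.2) := by
  rcases List.mem_map.mp hk with ⟨kv, hkv, hk1⟩
  have hsome : ((PySem.Dict.mk wc).get? k).isSome := by
    simp only [PySem.Dict.get?, Option.isSome_map]
    exact List.find?_isSome.mpr ⟨kv, hkv, by simp [hk1]⟩
  rcases Option.isSome_iff_exists.mp hsome with ⟨w, hw⟩
  have hmem : (k, w) ∈ wc := PySem.Dict.mem_items_of_get?_eq_some _ hw
  have hlk : pvLk wc k = w := by simp [pvLk, PySem.Dict.getD, hw]
  rw [hlk]
  exact List.mem_map.mpr ⟨(k, w), List.mem_filter.mpr ⟨hmem, by simpa using hb⟩, rfl⟩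

theorem pvDB_keys (banned : List String) (wc : List (String × Int)) :
    (pvDB banned wc).keys = (pvD1 banned wc).keys := by
  unfold pvDB
  rw [PySem.Dict.keys_foldl_modify_key _ (pvLk wc) [] (fun _ k => (fun l => l ++ [k]))]
  refine pvUpdate_eq_self _ _ ?_
  intro x hx
  rcases List.mem_map.mp hx with ⟨k, hkf, rfl⟩
  rcases List.mem_filter.mp hkf with ⟨hks, hb⟩
  rw [pvD1_keys]
  refine (PySem.Set.mem_ofList _ _).mpr ?_
  exact pvLk_mem banned wc k (((PySem.List.sorted_perm _ _ _).mem_iff).mp hks) hb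

-- the sorted key list is strictly increasing when the dict keys are distinct
theorem pvSortedKeys_lt (wc : List (String × Int)) (hnd : (wc.map Prod.fst).Nodup) :
    (pvSortedKeys wc).Pairwise (· < ·) := by
  have hle : (pvSortedKeys wc).Pairwise (· ≤ ·) := by
    simpa using PySem.List.sorted_pairwise (wc.map Prod.fst) (fun x => x)
  have hnd' : (pvSortedKeys wc).Nodup :=
    ((PySem.List.sorted_perm (wc.map Prod.fst) (fun x => x) false).symm).nodup hnd
  exact (hle.and hnd').imp (fun h => lt_of_le_of_ne h.1 h.2)

-- CORE: each bucket of A, sorted, is the corresponding bucket of B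
theorem pvBucket (banned : List String) (wc : List (String × Int))
    (hnd : (wc.map Prod.fst).Nodup) (v : Int) :
    pvMsort ((pvDA banned wc).getD v []) = (pvDB banned wc).getD v [] := by
  rw [pvDA_getD, pvDB_getD, pvMsort]
  set Q : String → Bool := fun k => (!(banned.contains k)) && (pvLk wc k == v) with hQ
  have hB : ((pvSortedKeys wc).filter (fun k => !(banned.contains k))).filter
        (fun k => pvLk wc k == v) = (pvSortedKeys wc).filter Q := by
    rw [List.filter_filter]
    exact List.filter_congr (fun k _ => by simp [hQ, Bool.and_comm])
  have hA : ((pvFilt banned wc).filter (fun kv => kv.2 == v)).map Prod.fst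
      = (wc.map Prod.fst).filter Q := by
    rw [List.filter_map]
    unfold pvFilt
    rw [List.filter_filter]
    have hcong : ∀ kv ∈ wc, ((kv.2 == v) && !(banned.contains kv.1))
        = (Q ∘ Prod.fst) kv := by
      intro kv hkv
      have hlk : pvLk wc kv.1 = kv.2 := by
        have : (PySem.Dict.mk wc).get? kv.1 = some kv.2 :=
          PySem.Dict.get?_of_mem_items _ (by simpa using hkv) (by simpa using hnd)
        simp [pvLk, PySem.Dict.getD, this]
      simp [hQ, Function.comp_def, hlk, Bool.and_comm]
    rw [List.filter_congr hcong]
  rw [hB, hA]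
  refine PySem.List.sorted_eq_of_perm_of_pairwise_lt _ _ _ ?_ ?_
  · exact (PySem.List.sorted_perm (wc.map Prod.fst) (fun x => x) false).filter Q
  · exact (pvSortedKeys_lt wc hnd).sublist List.filter_sublist

-- ===== VERDICT (by name: the statement is the Claim_ definition above) =====
theorem inverted_word_count_spec : Claim_equal_inverted_word_count := by
  intro wc banned _ hnd
  show inverted_word_count wc banned = inverted_word_count_alt wc banned
  have eA : inverted_word_count wc banned
      = (PySem.Dict.mk (pvMapS (pvDA banned wc).items)).items :=
    congrArg (fun d : PySem.Dict Int (List String) => (PySem.Dict.mk (pvMapS d.items)).items)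
      (pvAfold_eq banned wc)
  rw [eA]
  show _ = ((PySem.List.sorted (wc.map Prod.fst) (fun x => x) false).foldl (fun d k =>
      if PySem.Set.contains (PySem.Set.ofList banned) k = false then
        d.modify ((PySem.Dict.mk wc).getD k 0) [] (fun l => l ++ [k])
      else d) (wc.foldl (fun d kv =>
        if PySem.Set.contains (PySem.Set.ofList banned) kv.1 = false then d.insert kv.2 [] else d)
        PySem.Dict.empty)).items
  rw [pvB1fold_eq, pvB2fold_eq]
  have hndA : (pvDA banned wc).keys.Nodup := by
    rw [pvDA_keys]; exact PySem.Set.nodup_ofList _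
  have hndB : (pvDB banned wc).keys.Nodup := by
    rw [pvDB_keys, pvD1_keys]; exact PySem.Set.nodup_ofList _
  have hS : (PySem.Dict.mk (pvMapS (pvDA banned wc).items)).keys.Nodup := by
    rw [pvKeys_mapS]; exact hndA
  have hkeys : (PySem.Dict.mk (pvMapS (pvDA banned wc).items)).keys = (pvDB banned wc).keys := by
    rw [pvKeys_mapS, pvDB_keys, pvD1_keys, pvDA_keys]
  rw [PySem.Dict.items_eq_map_keys _ hS [], PySem.Dict.items_eq_map_keys _ hndB [], hkeys]
  refine List.map_congr_left (fun k _ => ?_)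
  rw [pvGetD_mapS]
  have hD : PySem.Dict.mk (pvDA banned wc).items = pvDA banned wc := rfl
  rw [hD, pvBucket banned wc (by simpa using hnd) k]
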